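-- pv_equiv track=rewrite | github.com/rotanpuolikas/launchpad-mini-gif | main.py | palette_for_mode
-- ===== SOURCE A (Python) =====
-- PALETTE = {
--     "black": (0, 0, 0),
--
--     "red_low": (85, 0, 0),
--     "red_med": (170, 0, 0),
--     "red_max": (255, 0, 0),
--
--     "green_low": (0, 85, 0),
--     "green_med": (0, 170, 0),
--     "green_max": (0, 255, 0),
--
--     "yellow_low": (85, 85, 0),
--     "yellow_med": (170, 170, 0),
--     "yellow_max": (255, 255, 0),
-- }
--
-- def palette_for_mode(mode):
--     if mode == "red":
--         return {k: v for k, v in PALETTE.items() if "red" in k or k == "black"}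
--     if mode == "green":
--         return {k: v for k, v in PALETTE.items() if "green" in k or k == "black"}
--     if mode == "yellow":
--         return {k: v for k, v in PALETTE.items() if "yellow" in k or k == "black"}
--     return PALETTE
-- ===== SOURCE B (Python) =====
-- PALETTE = {
--     "black": (0, 0, 0),
--
--     "red_low": (85, 0, 0),
--     "red_med": (170, 0, 0),
--     "red_max": (255, 0, 0),
--
--     "green_low": (0, 85, 0),
--     "green_med": (0, 170, 0),
--     "green_max": (0, 255, 0),
--
--     "yellow_low": (85, 85, 0),
--     "yellow_med": (170, 170, 0),
--     "yellow_max": (255, 255, 0),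
-- }
--
-- # B does not filter PALETTE at all: it GENERATES each mode's sub-palette from
-- # the palette's naming/value scheme (black + "<mode>_<level>" with the level's
-- # intensity placed in the mode's RGB channels).
-- LEVELS = [("low", 85), ("med", 170), ("max", 255)]
-- CHANNELS = {"red": (1, 0), "green": (0, 1), "yellow": (1, 1)}
--
-- def palette_for_mode(mode):
--     if mode not in CHANNELS:
--         return PALETTE
--     r, g = CHANNELS[mode]
--     d = {"black": (0, 0, 0)}
--     for name, v in LEVELS:
--         d[mode + "_" + name] = (v * r, v * g, 0)
--     return d
-- ===== Notes on version B (the rewrite author's own statement) =====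
-- stated objective: alternative
-- what changed: B never scans or filters PALETTE: it generates the mode's sub-palette constructively from the naming scheme (black plus '<mode>_<level>' entries with each level's intensity multiplied into the mode's RGB channel mask), instead of A's per-call substring-filter comprehension over the full palette.
import Mathlib
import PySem

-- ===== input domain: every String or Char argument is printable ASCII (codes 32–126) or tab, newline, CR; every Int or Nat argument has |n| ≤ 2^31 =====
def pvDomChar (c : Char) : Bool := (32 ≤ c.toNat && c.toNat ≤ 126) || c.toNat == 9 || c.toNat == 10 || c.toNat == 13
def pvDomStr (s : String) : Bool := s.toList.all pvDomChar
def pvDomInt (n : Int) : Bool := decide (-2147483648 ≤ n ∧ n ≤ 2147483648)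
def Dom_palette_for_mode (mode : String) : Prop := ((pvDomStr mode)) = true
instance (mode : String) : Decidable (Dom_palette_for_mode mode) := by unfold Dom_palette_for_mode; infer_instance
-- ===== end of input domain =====

-- B generates the mode's sub-palette from the naming/value scheme (channel mask × levels)
-- instead of filtering PALETTE; objective: alternative.

-- ===== PORT A =====
def PALETTE : List (String × Int × Int × Int) :=
  [("black", (0, 0, 0)),
   ("red_low", (85, 0, 0)), ("red_med", (170, 0, 0)), ("red_max", (255, 0, 0)),
   ("green_low", (0, 85, 0)), ("green_med", (0, 170, 0)), ("green_max", (0, 255, 0)),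
   ("yellow_low", (85, 85, 0)), ("yellow_med", (170, 170, 0)), ("yellow_max", (255, 255, 0))]

def palette_for_mode (mode : String) : List (String × Int × Int × Int) :=
  if mode == "red" then
    PALETTE.filter (fun kv => PySem.Str.isIn "red" kv.1 || kv.1 == "black")
  else if mode == "green" then
    PALETTE.filter (fun kv => PySem.Str.isIn "green" kv.1 || kv.1 == "black")
  else if mode == "yellow" then
    PALETTE.filter (fun kv => PySem.Str.isIn "yellow" kv.1 || kv.1 == "black")
  else PALETTE

-- ===== PORT B =====
def LEVELS : List (String × Int) := [("low", 85), ("med", 170), ("max", 255)]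

def CHANNELS : PySem.Dict String (Int × Int) :=
  PySem.Dict.ofList [("red", (1, 0)), ("green", (0, 1)), ("yellow", (1, 1))]

def palette_for_mode_alt (mode : String) : List (String × Int × Int × Int) :=
  match PySem.Dict.get? CHANNELS mode with
  | none => PALETTE
  | some (r, g) =>
    LEVELS.foldl
      (fun d nv => d ++ [(mode ++ "_" ++ nv.1, (nv.2 * r, nv.2 * g, 0))])
      [("black", (0, 0, 0))]

-- ===== PRECONDITION & SPEC =====
def Spec_palette_for_mode (mode : String) (out : List (String × Int × Int × Int)) : Prop := out = palette_for_mode_alt mode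
instance (mode : String) (out : List (String × Int × Int × Int)) : Decidable (Spec_palette_for_mode mode out) := by unfold Spec_palette_for_mode; infer_instance

-- ===== CLAIM =====
def Claim_equal_palette_for_mode : Prop := ∀ (mode : String), Dom_palette_for_mode mode → Spec_palette_for_mode mode (palette_for_mode mode)

-- ===== LEMMAS AND PROOFS =====

-- ===== VERDICT =====
theorem palette_for_mode_spec : Claim_equal_palette_for_mode := by
  intro mode _
  unfold Spec_palette_for_mode palette_for_mode palette_for_mode_alt
  by_cases h1 : mode = "red"
  · subst h1; decide
  · by_cases h2 : mode = "green"
    · subst h2; decide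
    · by_cases h3 : mode = "yellow"
      · subst h3; decide
      · have hget : PySem.Dict.get? CHANNELS mode = none := by
          simp [CHANNELS, PySem.Dict.ofList, PySem.Dict.update, PySem.Dict.insert,
            PySem.Dict.get?, PySem.Dict.empty, Ne.symm h1, Ne.symm h2, Ne.symm h3]
        rw [hget]
        simp only [beq_iff_eq, h1, h2, h3, if_false]
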